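-- pv_equiv track=rewrite | github.com/zy-cuhk/polishing_mobileplatform_planner | scripts/aubo_collisition.py | list_change_3_7_11
-- ===== SOURCE A (Python) =====
-- def list_change_3_7_11(inital_list_data,list_data):
--     temp=[]
--     for i in range(len(inital_list_data)):
--         if i==3:
--             temp.append(list_data[0])
--         elif i==7:
--             temp.append(list_data[1])
--         elif i==11:
--             temp.append(list_data[2])
--         else:
--             temp.append(inital_list_data[i])
--     return temp
-- ===== SOURCE B (Python) =====
-- def list_change_3_7_11(inital_list_data, list_data):
--     temp = list(inital_list_data)
--     n = len(temp)
--     if n > 3: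
--         temp[3] = list_data[0]
--     if n > 7:
--         temp[7] = list_data[1]
--     if n > 11:
--         temp[11] = list_data[2]
--     return temp
-- ===== Notes on version B (the rewrite author's own statement) =====
-- stated objective: simpler
-- what changed: B copies the whole list in one bulk step and patches only positions 3, 7 and 11 by direct guarded index assignment, instead of A's element-by-element loop branching on every index.
import Mathlib
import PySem

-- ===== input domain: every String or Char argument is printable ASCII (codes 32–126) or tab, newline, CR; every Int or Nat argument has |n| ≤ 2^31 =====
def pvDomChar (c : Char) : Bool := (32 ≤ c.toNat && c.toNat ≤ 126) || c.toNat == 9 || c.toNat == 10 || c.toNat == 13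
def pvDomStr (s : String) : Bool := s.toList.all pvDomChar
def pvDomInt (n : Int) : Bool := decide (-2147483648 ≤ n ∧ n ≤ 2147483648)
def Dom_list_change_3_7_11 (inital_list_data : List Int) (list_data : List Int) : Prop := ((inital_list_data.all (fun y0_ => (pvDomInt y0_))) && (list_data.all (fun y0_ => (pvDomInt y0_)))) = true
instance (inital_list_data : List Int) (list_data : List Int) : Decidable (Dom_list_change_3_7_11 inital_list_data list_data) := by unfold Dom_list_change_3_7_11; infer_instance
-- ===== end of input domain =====

-- B replaces A's element-by-element conditional loop by one bulk copy plus three guarded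
-- in-place writes at positions 3, 7, 11 (objective: simpler).

-- ===== PORT A =====
-- loop over range(len(inital_list_data)), appending to temp; list_data[i] / inital_list_data[i]
-- are in range on Pre_, so getD's default is never used there.
def list_change_3_7_11 (inital_list_data : List Int) (list_data : List Int) : List Int :=
  (List.range inital_list_data.length).foldl (fun temp i =>
    if i = 3 then temp ++ [list_data.getD 0 0]
    else if i = 7 then temp ++ [list_data.getD 1 0]
    else if i = 11 then temp ++ [list_data.getD 2 0]
    else temp ++ [inital_list_data.getD i 0]) []

-- ===== PORT B =====
-- temp = list(inital_list_data); guarded writes temp[3], temp[7], temp[11]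
def list_change_3_7_11_alt (inital_list_data : List Int) (list_data : List Int) : List Int :=
  let temp := inital_list_data
  let n := temp.length
  let temp := if 3 < n then temp.set 3 (list_data.getD 0 0) else temp
  let temp := if 7 < n then temp.set 7 (list_data.getD 1 0) else temp
  let temp := if 11 < n then temp.set 11 (list_data.getD 2 0) else temp
  temp

-- ===== PRECONDITION & SPEC =====
-- Pre_ excludes exactly the inputs where the Python A raises IndexError: list_data too short
-- for a position 3/7/11 that the loop actually reaches. (B raises on exactly the same inputs.)
def Pre_list_change_3_7_11 (inital_list_data : List Int) (list_data : List Int) : Prop :=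
  (3 < inital_list_data.length → 0 < list_data.length) ∧
  (7 < inital_list_data.length → 1 < list_data.length) ∧
  (11 < inital_list_data.length → 2 < list_data.length)
instance (inital_list_data : List Int) (list_data : List Int) : Decidable (Pre_list_change_3_7_11 inital_list_data list_data) := by unfold Pre_list_change_3_7_11; infer_instance
def pvWitness_list_change_3_7_11 : List Int × List Int := ([1,2,3,4,5], [9])

def Spec_list_change_3_7_11 (inital_list_data : List Int) (list_data : List Int) (out : List Int) : Prop := out = list_change_3_7_11_alt inital_list_data list_data
instance (inital_list_data : List Int) (list_data : List Int) (out : List Int) : Decidable (Spec_list_change_3_7_11 inital_list_data list_data out) := by unfold Spec_list_change_3_7_11; infer_instance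

-- ===== CLAIM =====
def Claim_equal_list_change_3_7_11 : Prop := ∀ (inital_list_data : List Int) (list_data : List Int), Dom_list_change_3_7_11 inital_list_data list_data → Pre_list_change_3_7_11 inital_list_data list_data → Spec_list_change_3_7_11 inital_list_data list_data (list_change_3_7_11 inital_list_data list_data)

-- ===== LEMMAS AND PROOFS =====

-- the per-index value both programs produce
def pvF (inital_list_data : List Int) (list_data : List Int) (i : Nat) : Int :=
  if i = 3 then list_data.getD 0 0
  else if i = 7 then list_data.getD 1 0
  else if i = 11 then list_data.getD 2 0
  else inital_list_data.getD i 0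

theorem pv_foldl_map (init ld : List Int) (l : List Nat) (acc : List Int) :
    l.foldl (fun temp i =>
      if i = 3 then temp ++ [ld.getD 0 0]
      else if i = 7 then temp ++ [ld.getD 1 0]
      else if i = 11 then temp ++ [ld.getD 2 0]
      else temp ++ [init.getD i 0]) acc = acc ++ l.map (pvF init ld) := by
  induction l generalizing acc with
  | nil => simp
  | cons x xs ih =>
    simp only [List.foldl_cons, List.map_cons, ih, pvF]
    split_ifs <;> simp

theorem pv_A_map (init ld : List Int) :
    list_change_3_7_11 init ld = (List.range init.length).map (pvF init ld) := by
  unfold list_change_3_7_11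
  rw [pv_foldl_map]
  simp

-- ===== VERDICT =====
theorem list_change_3_7_11_spec : Claim_equal_list_change_3_7_11 := by
  intro init ld _ _
  unfold Spec_list_change_3_7_11
  rw [pv_A_map]
  simp only [list_change_3_7_11_alt]
  apply List.ext_getElem
  · split_ifs <;> simp
  · intro i h1 h2
    have hi : i < init.length := by simpa using h1
    simp only [List.getElem_map, List.getElem_range, pvF]
    split_ifs <;> subst_eqs <;>
      simp_all [List.getElem_set, List.getD_eq_getElem?_getD] <;>
      omega
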